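-- pv_equiv track=rewrite | github.com/KimGeunUk/Algorithm-Study | Programmers/Level2/덧칠하기.py | solution
-- ===== SOURCE A (Python) =====
-- def solution(n, m, section):
--     answer = 1
--     paint_start = section[0]
--
--     for sec in section[1:]:
--         if sec < paint_start + m:
--             pass
--         else:
--             paint_start = sec
--             answer += 1
--
--     return answer
-- ===== SOURCE B (Python) =====
-- def solution(n, m, section):
--     first = section[0]
--     L = len(section)
--
--     # balanced max-tree over section: (max, None, None) leaf or (max, left, right)
--     def build(lo, hi):
--         if hi - lo == 1:
--             return (section[lo], None, None)
--         mid = (lo + hi) // 2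
--         lt = build(lo, mid)
--         rt = build(mid, hi)
--         return (lt[0] if lt[0] >= rt[0] else rt[0], lt, rt)
--
--     root = build(0, L)
--
--     # first index j in [lo,hi) with j >= start and section[j] >= t, else None
--     def first_ge(node, lo, hi, start, t):
--         if hi <= start or node[0] < t:
--             return None
--         if node[1] is None:
--             return lo
--         mid = (lo + hi) // 2
--         j = first_ge(node[1], lo, mid, start, t)
--         if j is not None:
--             return j
--         return first_ge(node[2], mid, hi, start, t)
--
--     ans = 1
--     i = 0
--     t = first + m
--     while True:
--         j = first_ge(root, 0, L, i + 1, t)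
--         if j is None:
--             return ans
--         ans += 1
--         i = j
--         t = section[j] + m
-- ===== Notes on version B (the rewrite author's own statement) =====
-- stated objective: alternative
-- what changed: B builds a balanced max-tree over the sections once and computes the answer by hopping anchor to anchor, finding each next uncovered section (first index with value >= cover) by descending the tree, instead of A's flat left-to-right scan with a paint_start marker.
import Mathlib
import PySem

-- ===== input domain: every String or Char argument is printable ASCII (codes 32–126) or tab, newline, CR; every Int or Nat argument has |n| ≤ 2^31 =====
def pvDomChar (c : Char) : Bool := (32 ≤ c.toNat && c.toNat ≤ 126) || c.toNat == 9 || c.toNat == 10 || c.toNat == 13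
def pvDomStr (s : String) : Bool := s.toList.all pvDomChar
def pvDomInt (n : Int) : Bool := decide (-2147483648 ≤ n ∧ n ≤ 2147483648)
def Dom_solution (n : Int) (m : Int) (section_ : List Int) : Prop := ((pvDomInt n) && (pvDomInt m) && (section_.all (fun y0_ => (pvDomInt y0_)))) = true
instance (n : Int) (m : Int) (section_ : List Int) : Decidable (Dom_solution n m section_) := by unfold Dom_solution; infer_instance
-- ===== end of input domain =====

-- B replaces A's flat scan with a paint_start marker by a balanced max-tree over the
-- sections, finding each next uncovered section by tree descent and hopping anchor to
-- anchor ("alternative": different algorithm/data structure, similar cost).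

-- ===== PORT A =====
-- A: answer = 1; paint_start = section[0]; for sec in section[1:] …
-- (section[0] raises IndexError on []; excluded by Pre_solution, the [] branch is a dummy)
def solution (n : Int) (m : Int) (section_ : List Int) : Int :=
  match section_ with
  | [] => 0
  | s0 :: rest =>
    (rest.foldl (fun (p : Int × Int) sec =>
      if sec < p.2 + m then p else (p.1 + 1, sec)) (1, s0)).1

-- ===== PORT B =====
-- node of the balanced max-tree (Python: tuple (max, left, right), leaf = (max, None, None))
inductive MTree where
  | leaf : Int → MTree
  | node : Int → MTree → MTree → MTree

def MTree.mx : MTree → Int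
  | .leaf v => v
  | .node m _ _ => m

-- Python's build(lo, hi); only ever called with lo < hi (the fuel-exhausted and
-- hi ≤ lo + 1 fallbacks are unreachable: fuel starts at the list length ≥ hi - lo).
-- section[lo] in a leaf is always in range, so getD is exact.
def build (fuel : Nat) (s : List Int) (lo hi : Nat) : MTree :=
  match fuel with
  | 0 => MTree.leaf 0
  | f + 1 =>
    if hi - lo = 1 then MTree.leaf (s.getD lo 0)
    else if lo + 1 < hi then
      MTree.node
        (if (build f s lo ((lo + hi) / 2)).mx ≥ (build f s ((lo + hi) / 2) hi).mx
          then (build f s lo ((lo + hi) / 2)).mx else (build f s ((lo + hi) / 2) hi).mx)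
        (build f s lo ((lo + hi) / 2)) (build f s ((lo + hi) / 2) hi)
    else MTree.leaf 0

-- Python's first_ge(node, lo, hi, start, t): first index j in [lo,hi) with j ≥ start
-- and section[j] ≥ t, else None (node[1] is None ↔ the node is a leaf)
def firstGe : MTree → Nat → Nat → Nat → Int → Option Nat
  | .leaf v, lo, hi, start, t =>
    if hi ≤ start ∨ v < t then none else some lo
  | .node mx l r, lo, hi, start, t =>
    if hi ≤ start ∨ mx < t then none
    else
      let mid := (lo + hi) / 2
      match firstGe l lo mid start t with
      | some j => some j
      | none => firstGe r mid hi start t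

-- the `while True` hop loop; fuel only totalizes it (each hop strictly increases i,
-- so length + 1 fuel never runs out)
def altLoop (fuel : Nat) (s : List Int) (m : Int) (root : MTree) (L : Nat)
    (i : Nat) (t : Int) (ans : Int) : Int :=
  match fuel with
  | 0 => ans
  | f + 1 =>
    match firstGe root 0 L (i + 1) t with
    | none => ans
    | some j => altLoop f s m root L j (s.getD j 0 + m) (ans + 1)

def solution_alt (n : Int) (m : Int) (section_ : List Int) : Int :=
  match section_ with
  | [] => 0  -- Python raises IndexError at section[0]; outside Pre_solution
  | s0 :: _ =>
    let L := section_.length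
    altLoop (L + 1) section_ m (build L section_ 0 L) L 0 (s0 + m) 1

-- ===== PRECONDITION & SPEC =====
-- Pre_ excludes exactly the empty list, on which both A and B raise IndexError at section[0].
def Pre_solution (n : Int) (m : Int) (section_ : List Int) : Prop := section_ ≠ []
instance (n : Int) (m : Int) (section_ : List Int) : Decidable (Pre_solution n m section_) := by unfold Pre_solution; infer_instance
def pvWitness_solution : Int × Int × List Int := (8, 4, [2, 5, 6])

def Spec_solution (n : Int) (m : Int) (section_ : List Int) (out : Int) : Prop := out = solution_alt n m section_
instance (n : Int) (m : Int) (section_ : List Int) (out : Int) : Decidable (Spec_solution n m section_ out) := by unfold Spec_solution; infer_instance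

-- ===== CLAIM =====
def Claim_equal_solution : Prop := ∀ (n : Int) (m : Int) (section_ : List Int), Dom_solution n m section_ → Pre_solution n m section_ → Spec_solution n m section_ (solution n m section_)

-- ===== LEMMAS AND PROOFS =====

-- A's loop body as a named function.
def stepA (m : Int) (p : Int × Int) (sec : Int) : Int × Int :=
  if sec < p.2 + m then p else (p.1 + 1, sec)

-- reference search: first index k in [j, hi) with s.getD k 0 ≥ t
def firstIn (s : List Int) (t : Int) (hi j : Nat) : Option Nat :=
  if h : j < hi then
    if s.getD j 0 ≥ t then some j else firstIn s t hi (j + 1)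
  else none
termination_by hi - j
decreasing_by omega

theorem firstIn_none_of_lt (s : List Int) (t : Int) (hi j : Nat)
    (h : ∀ k, j ≤ k → k < hi → s.getD k 0 < t) : firstIn s t hi j = none := by
  induction j using firstIn.induct (s := s) (t := t) (hi := hi) with
  | case1 j hj hge =>
    exact absurd (h j (le_refl j) hj) (by omega)
  | case2 j hj hge ih =>
    rw [firstIn, dif_pos hj, if_neg hge]
    exact ih (fun k hk1 hk2 => h k (by omega) hk2)
  | case3 j hj =>
    rw [firstIn, dif_neg hj]

theorem firstIn_some (s : List Int) (t : Int) (hi j k : Nat)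
    (h : firstIn s t hi j = some k) : j ≤ k ∧ k < hi ∧ t ≤ s.getD k 0 := by
  induction j using firstIn.induct (s := s) (t := t) (hi := hi) with
  | case1 j hj hge =>
    rw [firstIn, dif_pos hj, if_pos hge] at h
    cases h; exact ⟨le_refl _, hj, hge⟩
  | case2 j hj hge ih =>
    rw [firstIn, dif_pos hj, if_neg hge] at h
    have := ih h; omega
  | case3 j hj =>
    rw [firstIn, dif_neg hj] at h; cases h

theorem firstIn_mono_hi (s : List Int) (t : Int) (mid hi j k : Nat) (hmh : mid ≤ hi)
    (h : firstIn s t mid j = some k) : firstIn s t hi j = some k := by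
  induction j using firstIn.induct (s := s) (t := t) (hi := mid) with
  | case1 j hj hge =>
    rw [firstIn, dif_pos hj, if_pos hge] at h
    rw [firstIn, dif_pos (by omega), if_pos hge]; exact h
  | case2 j hj hge ih =>
    rw [firstIn, dif_pos hj, if_neg hge] at h
    rw [firstIn, dif_pos (by omega), if_neg hge]
    exact ih h
  | case3 j hj =>
    rw [firstIn, dif_neg hj] at h; cases h

theorem firstIn_skip (s : List Int) (t : Int) (mid hi j : Nat) (hmh : mid ≤ hi) (hjm : j ≤ mid)
    (h : firstIn s t mid j = none) : firstIn s t hi j = firstIn s t hi mid := by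
  induction j using firstIn.induct (s := s) (t := t) (hi := mid) with
  | case1 j hj hge =>
    rw [firstIn, dif_pos hj, if_pos hge] at h; cases h
  | case2 j hj hge ih =>
    rw [firstIn, dif_pos hj, if_neg hge] at h
    conv_lhs => rw [firstIn]
    rw [dif_pos (by omega), if_neg hge]
    exact ih (by omega) h
  | case3 j hj =>
    have : j = mid := by omega
    rw [this]

theorem mx_node_eq (x : Int) (l r : MTree) : (MTree.node x l r).mx = x := rfl

theorem build_mx_ub (s : List Int) (fuel : Nat) :
    ∀ lo hi, lo < hi → hi - lo ≤ fuel →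
      ∀ k, lo ≤ k → k < hi → s.getD k 0 ≤ (build fuel s lo hi).mx := by
  induction fuel with
  | zero => intro lo hi h1 h2; omega
  | succ f ih =>
    intro lo hi hlh hf k hk1 hk2
    rw [build]
    by_cases h1 : hi - lo = 1
    · have : k = lo := by omega
      rw [if_pos h1, this]
      exact le_rfl
    · rw [if_neg h1, if_pos (by omega), mx_node_eq]
      by_cases hk : k < (lo + hi) / 2
      · have := ih lo ((lo + hi) / 2) (by omega) (by omega) k hk1 hk
        split <;> omega
      · have := ih ((lo + hi) / 2) hi (by omega) (by omega) k (by omega) hk2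
        split <;> omega

theorem tree_spec (s : List Int) (fuel : Nat) :
    ∀ lo hi, lo < hi → hi - lo ≤ fuel → ∀ (start : Nat) (t : Int),
      firstGe (build fuel s lo hi) lo hi start t = firstIn s t hi (max start lo) := by
  induction fuel with
  | zero => intro lo hi h1 h2; omega
  | succ f ih =>
    intro lo hi hlh hf start t
    rw [build]
    by_cases h1 : hi - lo = 1
    · rw [if_pos h1, firstGe]
      by_cases hs : hi ≤ start
      · rw [if_pos (Or.inl hs), firstIn, dif_neg (by omega)]
      · by_cases hv : s.getD lo 0 < t
        · rw [if_pos (Or.inr hv)]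
          have hm : max start lo = lo := by omega
          rw [hm, firstIn, dif_pos (by omega), if_neg (by omega), firstIn, dif_neg (by omega)]
        · rw [if_neg (by tauto)]
          have hm : max start lo = lo := by omega
          rw [hm, firstIn, dif_pos (by omega), if_pos (by omega)]
    · rw [if_neg h1, if_pos (by omega)]
      simp only [firstGe]
      by_cases hs : hi ≤ start
      · rw [if_pos (Or.inl hs), firstIn, dif_neg (by omega)]
      · set mxv := if (build f s lo ((lo + hi) / 2)).mx ≥ (build f s ((lo + hi) / 2) hi).mx
          then (build f s lo ((lo + hi) / 2)).mx else (build f s ((lo + hi) / 2) hi).mx with hmxv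
        by_cases hv : mxv < t
        · rw [if_pos (Or.inr hv)]
          refine (firstIn_none_of_lt s t hi (max start lo) ?_).symm
          intro k hk1 hk2
          by_cases hk : k < (lo + hi) / 2
          · have := build_mx_ub s f lo ((lo + hi) / 2) (by omega) (by omega) k (by omega) hk
            split at hmxv <;> omega
          · have := build_mx_ub s f ((lo + hi) / 2) hi (by omega) (by omega) k (by omega) hk2
            split at hmxv <;> omega
        · rw [if_neg (by tauto)]
          have hL := ih lo ((lo + hi) / 2) (by omega) (by omega) start t
          have hR := ih ((lo + hi) / 2) hi (by omega) (by omega) start t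
          rw [hL]
          cases hfi : firstIn s t ((lo + hi) / 2) (max start lo) with
          | some j =>
            exact (firstIn_mono_hi s t ((lo + hi) / 2) hi (max start lo) j (by omega) hfi).symm
          | none =>
            rw [hR]
            by_cases hsm : start ≤ (lo + hi) / 2
            · rw [firstIn_skip s t ((lo + hi) / 2) hi (max start lo) (by omega) (by omega) hfi,
                Nat.max_eq_right hsm]
            · rw [Nat.max_eq_left (show lo ≤ start by omega),
                Nat.max_eq_left (show (lo + hi) / 2 ≤ start by omega)]

theorem fold_firstIn (s : List Int) (m : Int) (j : Nat) (ans start : Int) :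
    ((s.drop j).foldl (stepA m) (ans, start)).1 =
      match firstIn s (start + m) s.length j with
      | none => ans
      | some k => ((s.drop (k + 1)).foldl (stepA m) (ans + 1, s.getD k 0)).1 := by
  suffices H : ∀ n j ans start, s.length - j ≤ n →
      ((s.drop j).foldl (stepA m) (ans, start)).1 =
      match firstIn s (start + m) s.length j with
      | none => ans
      | some k => ((s.drop (k + 1)).foldl (stepA m) (ans + 1, s.getD k 0)).1 by
    exact H s.length j ans start (by omega)
  intro n
  induction n with
  | zero =>
    intro j ans start hn
    rw [List.drop_eq_nil_of_le (by omega), firstIn, dif_neg (by omega)]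
    rfl
  | succ n ih =>
    intro j ans start hn
    by_cases hj : j < s.length
    · rw [List.drop_eq_getElem_cons hj, List.foldl_cons]
      have hgd : s.getD j 0 = s[j] := List.getD_eq_getElem s 0 hj
      by_cases hge : s.getD j 0 ≥ start + m
      · rw [firstIn, dif_pos hj, if_pos hge]
        rw [hgd] at hge
        show (List.foldl (stepA m) (stepA m (ans, start) s[j]) (List.drop (j + 1) s)).1 =
          (List.foldl (stepA m) (ans + 1, s.getD j 0) (List.drop (j + 1) s)).1
        rw [hgd]
        simp only [stepA]
        rw [if_neg (by omega)]
      · rw [firstIn, dif_pos hj, if_neg hge]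
        rw [hgd] at hge
        have hstep : stepA m (ans, start) s[j] = (ans, start) := by
          simp only [stepA]; rw [if_pos (by omega)]
        rw [hstep]
        exact ih (j + 1) ans start (by omega)
    · rw [List.drop_eq_nil_of_le (by omega), firstIn, dif_neg (by omega)]
      rfl

theorem loop_eq (s : List Int) (m : Int) (hL : 0 < s.length) (fuel j : Nat) (ans : Int)
    (hf : s.length - j ≤ fuel) :
    altLoop fuel s m (build s.length s 0 s.length) s.length j (s.getD j 0 + m) ans =
      ((s.drop (j + 1)).foldl (stepA m) (ans, s.getD j 0)).1 := by
  induction fuel generalizing j ans with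
  | zero =>
    rw [List.drop_eq_nil_of_le (by omega)]
    rfl
  | succ f ih =>
    rw [altLoop]
    have ht := tree_spec s s.length 0 s.length hL (by omega) (j + 1) (s.getD j 0 + m)
    have hmax : max (j + 1) 0 = j + 1 := by omega
    rw [hmax] at ht
    rw [ht, fold_firstIn s m (j + 1) ans (s.getD j 0)]
    cases hfi : firstIn s (s.getD j 0 + m) s.length (j + 1) with
    | none => rfl
    | some k =>
      have hb := firstIn_some s (s.getD j 0 + m) s.length (j + 1) k hfi
      exact ih k (ans + 1) (by omega)

-- ===== VERDICT =====
theorem solution_spec : Claim_equal_solution := by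
  intro n m section_ _ hpre
  cases section_ with
  | nil => exact absurd rfl hpre
  | cons s0 rest =>
    show solution n m (s0 :: rest) = solution_alt n m (s0 :: rest)
    have h := loop_eq (s0 :: rest) m (by simp) ((s0 :: rest).length + 1) 0 1 (by omega)
    simp only [List.getD] at h
    simpa [solution, solution_alt, stepA] using h.symm
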